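-- pv_equiv track=rewrite | github.com/leesh2015/financial-timeseries-python | Section2.Advanced Investment Strategy Design/utils/metrics.py | max_loss
-- ===== SOURCE A (Python) =====
-- def max_loss(results: list) -> int:
--     """
--     Calculate maximum consecutive loss days.
--
--     Parameters:
--     -----------
--     results : list
--         List of portfolio values over time
--
--     Returns:
--     --------
--     int
--         Maximum number of consecutive days with losses
--     """
--     loss_streaks = []
--     current_streak = 0
--
--     for i in range(1, len(results)):
--         if results[i] < results[i-1]:
--             current_streak += 1
--         else:
--             loss_streaks.append(current_streak)
--             current_streak = 0
--     loss_streaks.append(current_streak)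
--
--     max_loss_streak = max(loss_streaks) if loss_streaks else 0
--     return max_loss_streak
-- ===== SOURCE B (Python) =====
-- def max_loss(results: list) -> int:
--     """Two-pass reformulation: build the day-over-day decline table, then
--     measure maximal runs of True by index grouping."""
--     d = [results[i] < results[i - 1] for i in range(1, len(results))]
--     runs = []
--     i = 0
--     while i < len(d):
--         j = i
--         while j < len(d) and d[j] == d[i]:
--             j += 1
--         if d[i]:
--             runs.append(j - i)
--         i = j
--     return max(runs, default=0)
-- ===== Notes on version B (the rewrite author's own statement) =====
-- stated objective: alternative
-- what changed: Replaces A's single interleaved streak-counter loop (which appends each finished streak to a list and maxes it) by two passes: first build the boolean day-over-day decline table d, then group consecutive equal entries of d by index jumps and take the maximum True-run length with default 0.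
import Mathlib
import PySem

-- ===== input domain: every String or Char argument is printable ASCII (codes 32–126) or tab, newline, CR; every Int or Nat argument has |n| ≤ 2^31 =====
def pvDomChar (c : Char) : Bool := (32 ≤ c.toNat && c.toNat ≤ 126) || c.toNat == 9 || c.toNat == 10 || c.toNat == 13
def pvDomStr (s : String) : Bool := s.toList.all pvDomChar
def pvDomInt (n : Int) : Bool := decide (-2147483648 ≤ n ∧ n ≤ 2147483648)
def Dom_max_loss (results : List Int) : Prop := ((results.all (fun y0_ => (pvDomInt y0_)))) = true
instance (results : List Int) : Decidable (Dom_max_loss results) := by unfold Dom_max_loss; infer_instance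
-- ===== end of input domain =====

-- B replaces A's interleaved streak-counter loop by two passes (decline table, then run grouping);
-- objective: alternative (same linear cost, different decomposition).

-- ===== PORT A =====
-- transliteration of A: one fold over range(1, len(results)) carrying (loss_streaks, current_streak);
-- the loop's indices are always in range, so pyGetD with default 0 is exact here.
def max_loss (results : List Int) : Int :=
  let st := (PySem.List.pyRange 1 results.length 1).foldl
    (fun (st : List Int × Int) i =>
      if PySem.List.pyGetD results i 0 < PySem.List.pyGetD results (i - 1) 0 then
        (st.1, st.2 + 1)
      else
        (st.1 ++ [st.2], 0)) ([], 0)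
  let loss_streaks := st.1 ++ [st.2]
  -- max(loss_streaks) if loss_streaks else 0  (the list is never empty after the final append)
  match PySem.List.max? loss_streaks (fun x => x) with
  | some m => m
  | none => 0

-- ===== PORT B =====
-- the index-grouping while loops of Source B: each outer step consumes one maximal run d[i..j)
-- of elements equal to d[i] (the inner 'while d[j] == d[i]' is the takeWhile/dropWhile split)
def pvRuns (l : List Bool) : List Int :=
  match l with
  | [] => []
  | b :: rest =>
      let run : Int := 1 + (rest.takeWhile (fun x => x == b)).length
      let rest' := rest.dropWhile (fun x => x == b)
      (if b then [run] else []) ++ pvRuns rest'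
termination_by l.length
decreasing_by
  simp only [List.length_cons]
  exact Nat.lt_succ_of_le (List.length_dropWhile_le _ _)

def max_loss_alt (results : List Int) : Int :=
  let d := (PySem.List.pyRange 1 results.length 1).map
    (fun i => decide (PySem.List.pyGetD results i 0 < PySem.List.pyGetD results (i - 1) 0))
  -- max(runs, default=0)
  PySem.List.maxD (pvRuns d) (fun x => x) 0

-- ===== PRECONDITION & SPEC =====
def Spec_max_loss (results : List Int) (out : Int) : Prop := out = max_loss_alt results
instance (results : List Int) (out : Int) : Decidable (Spec_max_loss results out) := by unfold Spec_max_loss; infer_instance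

-- ===== CLAIM (what is proved, stated in full; the proofs are below) =====
def Claim_equal_max_loss : Prop := ∀ (results : List Int), Dom_max_loss results → Spec_max_loss results (max_loss results)

-- ===== LEMMAS AND PROOFS =====

-- the day-over-day decline table, structurally
def pvCmp : List Int → List Bool
  | a :: b :: t => decide (b < a) :: pvCmp (b :: t)
  | _ => []

-- reference one-pass streak maximum both ports are reduced to
def pvRef : List Bool → Int → Int → Int
  | [], best, cur => max best cur
  | true :: r, best, cur => pvRef r best (cur + 1)
  | false :: r, best, cur => pvRef r (max best cur) 0

-- closed streaks of d started with current streak cur, plus the open final streak (A's loop state)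
def pvSegs : List Bool → Int → List Int × Int
  | [], cur => ([], cur)
  | true :: r, cur => pvSegs r (cur + 1)
  | false :: r, cur => (cur :: (pvSegs r 0).1, (pvSegs r 0).2)

theorem aux_range (r : List Int) :
    (List.range (r.length - 1)).map (fun k => decide (r.getD (k+1) 0 < r.getD k 0)) = pvCmp r := by
  induction r using pvCmp.induct with
  | case1 a b t ih =>
      simp only [List.length_cons, Nat.add_sub_cancel, List.range_succ_eq_map, List.map_cons,
        List.map_map, pvCmp, List.getD_cons_succ, List.getD_cons_zero]
      refine congrArg _ ?_
      rw [← ih]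
      simp [Function.comp]
  | case2 r h => cases r with
      | nil => simp [pvCmp]
      | cons a t => cases t with
        | nil => simp [pvCmp]
        | cons b t2 => exact absurd rfl (h a b t2)

-- the decline table both ports build (B explicitly, A inside its loop) is pvCmp
theorem map_range_eq_pvCmp (results : List Int) :
    (PySem.List.pyRange 1 results.length 1).map
      (fun i => decide (PySem.List.pyGetD results i 0 < PySem.List.pyGetD results (i - 1) 0))
      = pvCmp results := by
  rw [PySem.List.pyRange_one, List.map_map, ← aux_range]
  have hlen : ((results.length : ℤ) - 1).toNat = results.length - 1 := by omega
  rw [hlen]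
  apply List.map_congr_left
  intro k hk
  simp only [Function.comp]
  have h1 : (1 : ℤ) + (k : ℤ) - 1 = (k : ℤ) := by ring
  have h2 : (1 : ℤ) + (k : ℤ) = ((k+1 : ℕ) : ℤ) := by push_cast; ring
  rw [h1]
  simp only [h2, PySem.List.pyGetD_natCast]

-- A's loop, viewed over the decline table, computes pvSegs
theorem foldl_step_eq_segs (d : List Bool) (acc : List Int) (cur : Int) :
    d.foldl (fun (st : List Int × Int) b =>
      if b then (st.1, st.2 + 1) else (st.1 ++ [st.2], 0)) (acc, cur)
      = (acc ++ (pvSegs d cur).1, (pvSegs d cur).2) := by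
  induction d generalizing acc cur with
  | nil => simp [pvSegs]
  | cons b r ih =>
      cases b <;> simp [pvSegs, List.foldl_cons, ih]

theorem segs_nonneg (d : List Bool) (cur : Int) (h : 0 ≤ cur) :
    (∀ x ∈ (pvSegs d cur).1, 0 ≤ x) ∧ 0 ≤ (pvSegs d cur).2 := by
  induction d generalizing cur with
  | nil => simpa [pvSegs] using h
  | cons b r ih =>
      cases b with
      | true => exact ih (cur + 1) (by omega)
      | false =>
          obtain ⟨h1, h2⟩ := ih 0 le_rfl
          refine ⟨?_, h2⟩
          intro x hx
          simp only [pvSegs, List.mem_cons] at hx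
          rcases hx with rfl | hx
          · exact h
          · exact h1 x hx

theorem foldl_max_segs (d : List Bool) (best cur : Int) :
    List.foldl max best ((pvSegs d cur).1 ++ [(pvSegs d cur).2]) = pvRef d best cur := by
  induction d generalizing best cur with
  | nil => simp [pvSegs, pvRef]
  | cons b r ih =>
      cases b <;> simp [pvSegs, pvRef, ih]

theorem ref_true_run (k : List Bool) (hk : ∀ x ∈ k, x = true) (t : List Bool) (best cur : Int) :
    pvRef (k ++ t) best cur = pvRef t best (cur + k.length) := by
  induction k generalizing cur with
  | nil => simp
  | cons b r ih =>
      have hb : b = true := hk b (by simp)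
      subst hb
      rw [List.cons_append]
      show pvRef (r ++ t) best (cur + 1) = _
      rw [ih (fun x hx => hk x (by simp [hx])) (cur + 1)]
      congr 1
      simp
      ring

theorem ref_false_run (k : List Bool) (hk : ∀ x ∈ k, x = false) (t : List Bool) (best : Int)
    (h : 0 ≤ best) : pvRef (k ++ t) best 0 = pvRef t best 0 := by
  induction k with
  | nil => simp
  | cons b r ih =>
      have hb : b = false := hk b (by simp)
      subst hb
      rw [List.cons_append]
      show pvRef (r ++ t) (max best 0) 0 = _
      rw [max_eq_left h]
      exact ih (fun x hx => hk x (by simp [hx]))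

theorem dropWhile_head_false (p : Bool → Bool) (l t : List Bool) (c : Bool)
    (h : l.dropWhile p = c :: t) : p c = false := by
  have h2 : (l.dropWhile p) ≠ [] := by simp [h]
  have := List.head_dropWhile_not p h2
  have hc : (l.dropWhile p).head h2 = c := by simp [h]
  rwa [hc] at this

-- B's run-length pass also computes the reference streak maximum
theorem foldl_max_runs (d : List Bool) (best : Int) (h : 0 ≤ best) :
    List.foldl max best (pvRuns d) = pvRef d best 0 := by
  induction d using pvRuns.induct generalizing best with
  | case1 => simp [pvRuns, pvRef, max_eq_left h]
  | case2 b rest restd ih =>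
      have hsplit : rest.takeWhile (fun x => x == b) ++ restd = rest :=
        List.takeWhile_append_dropWhile
      have htake : ∀ x ∈ rest.takeWhile (fun x => x == b), x = b := by
        intro x hx
        simpa using List.mem_takeWhile_imp hx
      set run : Int := 1 + ((rest.takeWhile (fun x => x == b)).length : Int) with hrun
      cases b with
      | true =>
          rw [pvRuns]
          simp only [if_true, List.singleton_append, List.foldl_cons, ← hrun]
          rw [ih _ (le_trans h (le_max_left _ _))]
          show _ = pvRef (true :: rest) best 0
          rw [show pvRef (true :: rest) best 0 = pvRef rest best 1 from rfl, ← hsplit,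
            ref_true_run _ htake]
          cases hrest' : restd with
          | nil =>
              simp only [pvRef]
              omega
          | cons c t =>
              have hc : c = false := by
                simpa using dropWhile_head_false (fun x => x == true) rest t c hrest'
              subst hc
              simp only [pvRef]
              congr 1
              omega
      | false =>
          simp only [pvRuns, Bool.false_eq_true, if_false, List.nil_append]
          rw [ih best h]
          show _ = pvRef (false :: rest) best 0
          rw [show pvRef (false :: rest) best 0 = pvRef rest (max best 0) 0 from rfl,
            max_eq_left h, ← hsplit, ref_false_run _ htake _ _ h]

theorem runs_nonneg (l : List Bool) : ∀ x ∈ pvRuns l, 0 ≤ x := by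
  induction l using pvRuns.induct with
  | case1 => simp [pvRuns]
  | case2 b rest restd ih =>
      intro x hx
      rw [pvRuns] at hx
      rcases List.mem_append.mp hx with hx | hx
      · rcases b with _ | _
        · simp at hx
        · simp only [if_true, List.mem_singleton] at hx
          subst hx; positivity
      · exact ih x hx

-- Python's max of a nonempty list with nonnegative head is the running max from 0
theorem pymax_nonneg (x : Int) (t : List Int) (h : 0 ≤ x) :
    (match PySem.List.max? (x :: t) (fun y => y) with
     | some m => m | none => 0) = List.foldl max 0 (x :: t) := by
  rw [PySem.List.max?_id_cons]
  simp [max_eq_right h]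

theorem max_loss_eq_ref (results : List Int) :
    max_loss results = pvRef (pvCmp results) 0 0 := by
  unfold max_loss
  have hfold : (PySem.List.pyRange 1 results.length 1).foldl
      (fun (st : List Int × Int) i =>
        if PySem.List.pyGetD results i 0 < PySem.List.pyGetD results (i - 1) 0 then
          (st.1, st.2 + 1) else (st.1 ++ [st.2], 0)) ([], 0)
      = (pvCmp results).foldl (fun (st : List Int × Int) b =>
          if b then (st.1, st.2 + 1) else (st.1 ++ [st.2], 0)) ([], 0) := by
    rw [← map_range_eq_pvCmp, List.foldl_map]
    simp only [decide_eq_true_eq]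
  rw [hfold, foldl_step_eq_segs, List.nil_append]
  obtain ⟨h1, h2⟩ := segs_nonneg (pvCmp results) 0 le_rfl
  rw [← foldl_max_segs (pvCmp results) 0 0]
  cases hl : (pvSegs (pvCmp results) 0).1 with
  | nil =>
      simp only [List.nil_append]
      exact pymax_nonneg _ [] h2
  | cons x xs =>
      simp only [List.cons_append]
      exact pymax_nonneg x (xs ++ [(pvSegs (pvCmp results) 0).2])
        (h1 x (by rw [hl]; simp))

theorem max_loss_alt_eq_ref (results : List Int) :
    max_loss_alt results = pvRef (pvCmp results) 0 0 := by
  unfold max_loss_alt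
  rw [map_range_eq_pvCmp, ← foldl_max_runs (pvCmp results) 0 le_rfl]
  unfold PySem.List.maxD
  show (PySem.List.max? (pvRuns (pvCmp results)) fun x => x).getD 0 = _
  cases hr : pvRuns (pvCmp results) with
  | nil => simp [PySem.List.max?]
  | cons x t =>
      rw [PySem.List.max?_id_cons]
      have hx : 0 ≤ x := runs_nonneg _ x (by rw [hr]; simp)
      simp [max_eq_right hx]

-- ===== VERDICT (by name: the statement is the Claim_ definition above) =====
theorem max_loss_spec : Claim_equal_max_loss := by
  intro results _
  unfold Spec_max_loss
  rw [max_loss_eq_ref, max_loss_alt_eq_ref]
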